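-- pv_equiv track=rewrite | github.com/MIRIDIH-2023/UDOP-ket5 | core/datasets/rvlcdip.py | group_bbox
-- ===== SOURCE A (Python) =====
-- def group_bbox(bbox_lst, group_lst):
--
--     bbox_group_lst = []
--
--     for s in group_lst:
--         target = bbox_lst[s[0]:s[1]]
--         if len(target) == 1:
--             bbox_group_lst.append(*target)
--         else:
--             t = target[0][0]
--             l = target[0][1]
--             b = target[0][2]
--             r = target[0][3]
--             for i in target[1:]:
--                 if i[0] < t:
--                     t = i[0]
--                 if i[1] < l:
--                     l = i[1]
--                 if i[2] > b:
--                     b = i[2]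
--                 if i[3] > r:
--                     r = i[3]
--             bbox_group_lst.append([t,l,b,r])
--
--     return bbox_group_lst
-- ===== SOURCE B (Python) =====
-- def group_bbox(bbox_lst, group_lst):
--     def merge_dc(target):
--         # bounding box of a union = merge of the halves' bounding boxes (divide & conquer)
--         n = len(target)
--         if n == 1:
--             x = target[0]
--             return [x[0], x[1], x[2], x[3]]
--         m = n // 2
--         a = merge_dc(target[:m])
--         b = merge_dc(target[m:])
--         return [min(a[0], b[0]), min(a[1], b[1]), max(a[2], b[2]), max(a[3], b[3])]
--
--     def pick(target):
--         return target[0] if len(target) == 1 else merge_dc(target)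
--
--     return [pick(bbox_lst[s[0]:s[1]]) for s in group_lst]
-- ===== Notes on version B (the rewrite author's own statement) =====
-- stated objective: alternative
-- what changed: Replaces A's single fused left-to-right accumulator scan (four compare-and-assign updates per box, appended to a result list) with a divide-and-conquer recursion: each group's slice is split in half, each half's bounding box is computed recursively, and the two boxes are merged with min/min/max/max; groups are mapped by a comprehension.
import Mathlib
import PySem

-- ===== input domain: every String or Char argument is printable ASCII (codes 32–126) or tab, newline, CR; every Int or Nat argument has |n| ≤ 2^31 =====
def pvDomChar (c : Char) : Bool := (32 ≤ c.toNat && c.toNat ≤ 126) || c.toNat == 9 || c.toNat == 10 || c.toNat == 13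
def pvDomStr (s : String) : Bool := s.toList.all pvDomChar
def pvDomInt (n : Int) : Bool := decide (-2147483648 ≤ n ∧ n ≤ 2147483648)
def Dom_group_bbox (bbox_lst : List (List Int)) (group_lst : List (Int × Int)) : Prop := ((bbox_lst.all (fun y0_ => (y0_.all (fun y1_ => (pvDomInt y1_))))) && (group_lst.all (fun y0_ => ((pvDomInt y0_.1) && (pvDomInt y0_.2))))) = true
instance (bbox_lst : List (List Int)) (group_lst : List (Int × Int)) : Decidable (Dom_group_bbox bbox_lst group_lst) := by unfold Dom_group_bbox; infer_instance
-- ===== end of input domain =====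

-- B replaces A's fused left-to-right four-accumulator scan by a divide-and-conquer
-- recursion that merges the bounding boxes of the two halves of each slice (alternative).

-- ===== PORT A =====
-- the body of A's inner 'for i in target[1:]' loop (four compare-and-assign updates)
def pvStepA (st : Int × Int × Int × Int) (i : List Int) : Int × Int × Int × Int :=
  let t := if PySem.List.pyGetD i 0 0 < st.1 then PySem.List.pyGetD i 0 0 else st.1
  let l := if PySem.List.pyGetD i 1 0 < st.2.1 then PySem.List.pyGetD i 1 0 else st.2.1
  let b := if PySem.List.pyGetD i 2 0 > st.2.2.1 then PySem.List.pyGetD i 2 0 else st.2.2.1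
  let r := if PySem.List.pyGetD i 3 0 > st.2.2.2 then PySem.List.pyGetD i 3 0 else st.2.2.2
  (t, l, b, r)

def group_bbox (bbox_lst : List (List Int)) (group_lst : List (Int × Int)) : List (List Int) :=
  group_lst.foldl (fun acc s =>
    let target := PySem.List.slice bbox_lst (some s.1) (some s.2)
    if target.length = 1 then
      acc ++ [PySem.List.pyGetD target 0 []]
    else
      let h := PySem.List.pyGetD target 0 []
      let init := (PySem.List.pyGetD h 0 0, PySem.List.pyGetD h 1 0,
                   PySem.List.pyGetD h 2 0, PySem.List.pyGetD h 3 0)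
      let st := (PySem.List.slice target (some 1) none).foldl pvStepA init
      acc ++ [[st.1, st.2.1, st.2.2.1, st.2.2.2]]) []

-- ===== PORT B =====
-- 'merge_dc(target)' from Source B: split the slice in half and merge the halves' boxes.
-- target[:m] / target[m:] with the nonnegative m = len(target)//2 are exactly take/drop
-- (PySem.List.slice_to_natCast / slice_from_natCast). The 'target.length ≤ 1' base also
-- covers []: Python's merge_dc diverges on [] and never reaches [] from a nonempty call.
def pvMergeDC (target : List (List Int)) : List Int :=
  if h : target.length ≤ 1 then
    let x := PySem.List.pyGetD target 0 []
    [PySem.List.pyGetD x 0 0, PySem.List.pyGetD x 1 0,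
     PySem.List.pyGetD x 2 0, PySem.List.pyGetD x 3 0]
  else
    let m := target.length / 2
    let a := pvMergeDC (target.take m)
    let b := pvMergeDC (target.drop m)
    [min (PySem.List.pyGetD a 0 0) (PySem.List.pyGetD b 0 0),
     min (PySem.List.pyGetD a 1 0) (PySem.List.pyGetD b 1 0),
     max (PySem.List.pyGetD a 2 0) (PySem.List.pyGetD b 2 0),
     max (PySem.List.pyGetD a 3 0) (PySem.List.pyGetD b 3 0)]
termination_by target.length
decreasing_by
  · simp only [List.length_take]; omega
  · simp only [List.length_drop]; omega

-- 'pick(target)' from Source B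
def pvPickB (target : List (List Int)) : List Int :=
  if target.length = 1 then PySem.List.pyGetD target 0 [] else pvMergeDC target

def group_bbox_alt (bbox_lst : List (List Int)) (group_lst : List (Int × Int)) : List (List Int) :=
  group_lst.map (fun s => pvPickB (PySem.List.slice bbox_lst (some s.1) (some s.2)))

-- ===== PRECONDITION & SPEC =====
-- Pre_ excludes exactly the inputs on which Python A raises an IndexError: a group whose
-- slice is empty, or (in the multi-box branch) contains a box of fewer than four entries.
def Pre_group_bbox (bbox_lst : List (List Int)) (group_lst : List (Int × Int)) : Prop :=
  ∀ s ∈ group_lst,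
    PySem.List.slice bbox_lst (some s.1) (some s.2) ≠ [] ∧
    ((PySem.List.slice bbox_lst (some s.1) (some s.2)).length = 1 ∨
      ∀ x ∈ PySem.List.slice bbox_lst (some s.1) (some s.2), 4 ≤ x.length)
instance (bbox_lst : List (List Int)) (group_lst : List (Int × Int)) : Decidable (Pre_group_bbox bbox_lst group_lst) := by unfold Pre_group_bbox; infer_instance

def pvWitness_group_bbox : List (List Int) × (List (Int × Int)) :=
  ([[0, 0, 2, 2], [1, -1, 3, 1]], [(0, 2), (1, 2)])

def Spec_group_bbox (bbox_lst : List (List Int)) (group_lst : List (Int × Int)) (out : List (List Int)) : Prop := out = group_bbox_alt bbox_lst group_lst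
instance (bbox_lst : List (List Int)) (group_lst : List (Int × Int)) (out : List (List Int)) : Decidable (Spec_group_bbox bbox_lst group_lst out) := by unfold Spec_group_bbox; infer_instance

-- ===== CLAIM (what is proved, stated in full; the proofs are below) =====
def Claim_equal_group_bbox : Prop := ∀ (bbox_lst : List (List Int)) (group_lst : List (Int × Int)), Dom_group_bbox bbox_lst group_lst → Pre_group_bbox bbox_lst group_lst → Spec_group_bbox bbox_lst group_lst (group_bbox bbox_lst group_lst)

-- ===== LEMMAS AND PROOFS =====

-- column j of a slice
def pvCol (target : List (List Int)) (j : Int) : List Int :=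
  target.map (fun x => PySem.List.pyGetD x j 0)

-- min/max of a nonempty list as Python's running fold (0 on [], never used there)
def pyMinNE : List Int → Int
  | [] => 0
  | x :: xs => xs.foldl min x

def pyMaxNE : List Int → Int
  | [] => 0
  | x :: xs => xs.foldl max x

lemma foldl_min_min (l : List Int) : ∀ a b : Int, l.foldl min (min a b) = min a (l.foldl min b) := by
  induction l with
  | nil => intro a b; rfl
  | cons c cs ih => intro a b; simp only [List.foldl_cons, min_assoc]; exact ih a (min b c)

lemma foldl_max_max (l : List Int) : ∀ a b : Int, l.foldl max (max a b) = max a (l.foldl max b) := by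
  induction l with
  | nil => intro a b; rfl
  | cons c cs ih => intro a b; simp only [List.foldl_cons, max_assoc]; exact ih a (max b c)

lemma pyMinNE_append (l₁ l₂ : List Int) (h₁ : l₁ ≠ []) (h₂ : l₂ ≠ []) :
    pyMinNE (l₁ ++ l₂) = min (pyMinNE l₁) (pyMinNE l₂) := by
  cases l₁ with
  | nil => exact absurd rfl h₁
  | cons x xs =>
    cases l₂ with
    | nil => exact absurd rfl h₂
    | cons y ys =>
      simp only [pyMinNE, List.cons_append, List.foldl_append, List.foldl_cons]
      rw [← foldl_min_min]

lemma pyMaxNE_append (l₁ l₂ : List Int) (h₁ : l₁ ≠ []) (h₂ : l₂ ≠ []) :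
    pyMaxNE (l₁ ++ l₂) = max (pyMaxNE l₁) (pyMaxNE l₂) := by
  cases l₁ with
  | nil => exact absurd rfl h₁
  | cons x xs =>
    cases l₂ with
    | nil => exact absurd rfl h₂
    | cons y ys =>
      simp only [pyMaxNE, List.cons_append, List.foldl_append, List.foldl_cons]
      rw [← foldl_max_max]

-- the canonical per-group bounding box both programs compute
def pvBox (target : List (List Int)) : List Int :=
  [pyMinNE (pvCol target 0), pyMinNE (pvCol target 1),
   pyMaxNE (pvCol target 2), pyMaxNE (pvCol target 3)]

lemma pvCol_ne_nil (target : List (List Int)) (j : Int) (h : target ≠ []) : pvCol target j ≠ [] := by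
  cases target with
  | nil => exact absurd rfl h
  | cons x xs => simp [pvCol]

lemma pvCol_append (l₁ l₂ : List (List Int)) (j : Int) :
    pvCol (l₁ ++ l₂) j = pvCol l₁ j ++ pvCol l₂ j := by
  simp [pvCol]

-- B's divide-and-conquer recursion computes the canonical box of any nonempty slice
lemma pvMergeDC_eq : ∀ (n : Nat) (target : List (List Int)), target.length = n → target ≠ [] →
    pvMergeDC target = pvBox target := by
  intro n
  induction n using Nat.strong_induction_on with
  | _ n ih =>
    intro target hlen hne
    rw [pvMergeDC]
    by_cases h1 : target.length ≤ 1
    · match target, hne with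
      | x :: xs, _ =>
        have : xs = [] := by
          cases xs with
          | nil => rfl
          | cons y ys => simp at h1
        subst this
        simp [pvBox, pvCol, pyMinNE, pyMaxNE, PySem.List.pyGetD, PySem.List.pyGet?, PySem.List.pyIdx?]
    · simp only [h1, dif_neg, not_false_iff]
      have hlen2 : 2 ≤ target.length := by omega
      set m := target.length / 2 with hm
      have hm1 : 1 ≤ m := by omega
      have hmlt : m < target.length := by omega
      have hta : (target.take m).length = m := by simp; omega
      have htd : (target.drop m).length = target.length - m := by simp
      have hna : target.take m ≠ [] := by
        intro h; rw [h] at hta; simp at hta; omega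
      have hnd : target.drop m ≠ [] := by
        intro h; rw [h] at htd; simp at htd; omega
      rw [ih m (by omega) (target.take m) hta hna,
          ih (target.length - m) (by omega) (target.drop m) htd hnd]
      have hsplit : target = target.take m ++ target.drop m := (List.take_append_drop m target).symm
      simp only [pvBox]
      have g0 : ∀ (a b c d : Int), PySem.List.pyGetD [a, b, c, d] (0:Int) 0 = a := by
        intro a b c d; rfl
      have g1 : ∀ (a b c d : Int), PySem.List.pyGetD [a, b, c, d] (1:Int) 0 = b := by
        intro a b c d; rfl
      have g2 : ∀ (a b c d : Int), PySem.List.pyGetD [a, b, c, d] (2:Int) 0 = c := by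
        intro a b c d; rfl
      have g3 : ∀ (a b c d : Int), PySem.List.pyGetD [a, b, c, d] (3:Int) 0 = d := by
        intro a b c d; rfl
      simp only [g0, g1, g2, g3]
      conv_rhs => rw [hsplit]
      rw [pvCol_append, pvCol_append, pvCol_append, pvCol_append,
          pyMinNE_append _ _ (pvCol_ne_nil _ _ hna) (pvCol_ne_nil _ _ hnd),
          pyMinNE_append _ _ (pvCol_ne_nil _ _ hna) (pvCol_ne_nil _ _ hnd),
          pyMaxNE_append _ _ (pvCol_ne_nil _ _ hna) (pvCol_ne_nil _ _ hnd),
          pyMaxNE_append _ _ (pvCol_ne_nil _ _ hna) (pvCol_ne_nil _ _ hnd)]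

-- A's fused compare loop computes, componentwise, running min/min/max/max over the columns.
lemma pvStepA_foldl (rest : List (List Int)) :
    ∀ t l b r, rest.foldl pvStepA (t, l, b, r) =
      ((pvCol rest 0).foldl min t, (pvCol rest 1).foldl min l,
       (pvCol rest 2).foldl max b, (pvCol rest 3).foldl max r) := by
  induction rest with
  | nil => intro t l b r; simp [pvCol]
  | cons x xs ih =>
    intro t l b r
    simp only [List.foldl_cons, pvCol, List.map_cons, pvStepA]
    rw [ih]
    simp only [pvCol]
    have h1 : (if PySem.List.pyGetD x 0 0 < t then PySem.List.pyGetD x 0 0 else t) = min t (PySem.List.pyGetD x 0 0) := by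
      simp only [min_def]; split_ifs <;> omega
    have h2 : (if PySem.List.pyGetD x 1 0 < l then PySem.List.pyGetD x 1 0 else l) = min l (PySem.List.pyGetD x 1 0) := by
      simp only [min_def]; split_ifs <;> omega
    have h3 : (if PySem.List.pyGetD x 2 0 > b then PySem.List.pyGetD x 2 0 else b) = max b (PySem.List.pyGetD x 2 0) := by
      simp only [max_def]; split_ifs <;> omega
    have h4 : (if PySem.List.pyGetD x 3 0 > r then PySem.List.pyGetD x 3 0 else r) = max r (PySem.List.pyGetD x 3 0) := by
      simp only [max_def]; split_ifs <;> omega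
    rw [h1, h2, h3, h4]

-- per-group: the value A's loop body appends equals B's 'pick(target)'
lemma pvOne_eq (target : List (List Int)) :
    (if target.length = 1 then PySem.List.pyGetD target 0 []
     else
       let h := PySem.List.pyGetD target 0 []
       let init := (PySem.List.pyGetD h 0 0, PySem.List.pyGetD h 1 0,
                    PySem.List.pyGetD h 2 0, PySem.List.pyGetD h 3 0)
       let st := (PySem.List.slice target (some 1) none).foldl pvStepA init
       [st.1, st.2.1, st.2.2.1, st.2.2.2]) = pvPickB target := by
  cases target with
  | nil =>
    simp [pvPickB, pvMergeDC, PySem.List.slice, PySem.List.pyGetD, PySem.List.pyGet?, PySem.List.pyIdx?]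
  | cons x xs =>
    unfold pvPickB
    by_cases hlen : (x :: xs).length = 1
    · simp [hlen]
    · simp only [hlen, if_false]
      have hx : PySem.List.pyGetD (x :: xs) 0 [] = x := by
        simp [PySem.List.pyGetD, PySem.List.pyGet?, PySem.List.pyIdx?]
      have hdrop : PySem.List.slice (x :: xs) (some 1) none = xs := by
        have := PySem.List.slice_from (xs := x :: xs) (a := 1) (by omega)
        simpa using this
      simp only [hx, hdrop]
      rw [pvStepA_foldl]
      rw [pvMergeDC_eq (x :: xs).length (x :: xs) rfl (by simp)]
      simp only [pvBox, pvCol, List.map_cons, pyMinNE, pyMaxNE]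

lemma group_bbox_foldl (group_lst : List (Int × Int)) (bbox_lst : List (List Int)) :
    ∀ acc : List (List Int),
      group_lst.foldl (fun acc s =>
        let target := PySem.List.slice bbox_lst (some s.1) (some s.2)
        if target.length = 1 then
          acc ++ [PySem.List.pyGetD target 0 []]
        else
          let h := PySem.List.pyGetD target 0 []
          let init := (PySem.List.pyGetD h 0 0, PySem.List.pyGetD h 1 0,
                       PySem.List.pyGetD h 2 0, PySem.List.pyGetD h 3 0)
          let st := (PySem.List.slice target (some 1) none).foldl pvStepA init
          acc ++ [[st.1, st.2.1, st.2.2.1, st.2.2.2]]) acc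
      = acc ++ group_lst.map (fun s => pvPickB (PySem.List.slice bbox_lst (some s.1) (some s.2))) := by
  induction group_lst with
  | nil => intro acc; simp
  | cons s gl ih =>
    intro acc
    simp only [List.foldl_cons, List.map_cons]
    rw [ih]
    rw [← pvOne_eq (PySem.List.slice bbox_lst (some s.1) (some s.2))]
    by_cases hc : (PySem.List.slice bbox_lst (some s.1) (some s.2)).length = 1 <;>
      simp [hc]

-- ===== VERDICT (by name: the statement is the Claim_ definition above) =====
theorem group_bbox_spec : Claim_equal_group_bbox := by
  intro bbox_lst group_lst _ _
  unfold Spec_group_bbox group_bbox group_bbox_alt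
  rw [group_bbox_foldl]
  simp
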